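-- pv_equiv track=rewrite | github.com/paradisepilot/statistics | exercises/programming/stephenson-python-workbook/07-file-exception/src/Ex153.py | getLetterCounts
-- ===== SOURCE A (Python) =====
-- def getLetterCounts( word_counts ):
--     letter_counts = {}
--     for tempword in word_counts.keys():
--         for templetter in list(tempword):
--             if templetter in letter_counts.keys():
--                 letter_counts[templetter] += word_counts[tempword]
--             else:
--                 letter_counts[templetter]  = word_counts[tempword]
--     letter_counts = { k:letter_counts[k] for k in sorted(letter_counts.keys()) }
--     return( letter_counts )
-- ===== SOURCE B (Python) =====
-- def getLetterCounts(word_counts):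
--     letters = sorted(set("".join(word_counts)))
--     return {L: sum(word_counts[w] * w.count(L) for w in word_counts) for L in letters}
-- ===== Notes on version B (the rewrite author's own statement) =====
-- stated objective: alternative
-- what changed: Inverts the loop nesting: instead of accumulating a letter-count dict word-by-word and letter-by-letter, B first computes the sorted set of distinct letters of all keys joined, then builds each entry by summing word_counts[w] * w.count(L) over all words.
import Mathlib
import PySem

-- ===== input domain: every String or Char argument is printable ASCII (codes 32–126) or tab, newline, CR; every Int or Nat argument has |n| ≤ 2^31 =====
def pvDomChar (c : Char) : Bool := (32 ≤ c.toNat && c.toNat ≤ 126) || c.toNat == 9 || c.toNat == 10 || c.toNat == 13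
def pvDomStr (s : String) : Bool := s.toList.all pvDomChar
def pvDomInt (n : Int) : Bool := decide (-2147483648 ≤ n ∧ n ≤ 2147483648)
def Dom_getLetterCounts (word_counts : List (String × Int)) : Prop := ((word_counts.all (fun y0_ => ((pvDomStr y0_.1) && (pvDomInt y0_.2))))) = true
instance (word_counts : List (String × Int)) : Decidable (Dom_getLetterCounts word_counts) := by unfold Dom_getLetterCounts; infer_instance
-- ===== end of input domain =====

-- B inverts the loop nesting: it builds the sorted distinct-letter list first and sums
-- word_count * occurrences per letter, instead of A's letter-by-letter dict accumulation
-- (objective: alternative decomposition, same cost class).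
-- Both ports model Python's single-character strings as Char inside the letter dict/list
-- and rebuild the 1-char String keys in the final result (String.ofList [·] is injective, exact).

-- ===== PORT A =====
-- inner loop body: 'if templetter in letter_counts: += word_counts[w] else: = word_counts[w]'
def pvStepA (v : Int) (lc : PySem.Dict Char Int) (c : Char) : PySem.Dict Char Int :=
  if lc.contains c then lc.modify c 0 (· + v) else lc.insert c v

def getLetterCounts (word_counts : List (String × Int)) : List (String × Int) :=
  let wd := PySem.Dict.ofList word_counts
  let lc := wd.keys.foldl
    (fun lc w => w.toList.foldl (pvStepA (wd.getD w 0)) lc)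
    PySem.Dict.empty
  -- { k : letter_counts[k] for k in sorted(letter_counts.keys()) }
  (PySem.List.sorted lc.keys (fun x => x) false).map (fun c => (String.ofList [c], lc.getD c 0))

-- ===== PORT B =====
def getLetterCounts_alt (word_counts : List (String × Int)) : List (String × Int) :=
  let wd := PySem.Dict.ofList word_counts
  -- letters = sorted(set("".join(word_counts)))
  let letters := PySem.List.sorted (PySem.Set.ofList (wd.keys.flatMap String.toList)) (fun x => x) false
  -- {L: sum(word_counts[w] * w.count(L) for w in word_counts) for L in letters}
  letters.map (fun L =>
    (String.ofList [L], (wd.keys.map (fun w => wd.getD w 0 * (w.toList.count L : Int))).sum))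

-- ===== PRECONDITION & SPEC =====
def Spec_getLetterCounts (word_counts : List (String × Int)) (out : List (String × Int)) : Prop := out = getLetterCounts_alt word_counts
instance (word_counts : List (String × Int)) (out : List (String × Int)) : Decidable (Spec_getLetterCounts word_counts out) := by unfold Spec_getLetterCounts; infer_instance

-- ===== CLAIM (what is proved, stated in full; the proofs are below) =====
def Claim_equal_getLetterCounts : Prop := ∀ (word_counts : List (String × Int)), Dom_getLetterCounts word_counts → Spec_getLetterCounts word_counts (getLetterCounts word_counts)

-- ===== LEMMAS AND PROOFS =====

-- one inner step adds v exactly at key c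
theorem pvStepA_getD (v : Int) (lc : PySem.Dict Char Int) (c x : Char) :
    (pvStepA v lc c).getD x 0 = lc.getD x 0 + (if x = c then v else 0) := by
  unfold pvStepA
  by_cases h : lc.contains c = true
  · simp [h, PySem.Dict.getD_modify]
    split_ifs with hx
    · subst hx; ring
    · ring
  · simp only [Bool.not_eq_true] at h
    simp [h, PySem.Dict.getD_insert]
    split_ifs with hx
    · subst hx; rw [PySem.Dict.getD_of_not_contains _ _ h]; ring
    · ring

-- one inner step's keys are Set.add
theorem pvStepA_keys (v : Int) (lc : PySem.Dict Char Int) (c : Char) :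
    (pvStepA v lc c).keys = PySem.Set.add lc.keys c := by
  unfold pvStepA PySem.Set.add
  by_cases h : lc.contains c = true
  · have hm : c ∈ lc.keys := (PySem.Dict.contains_iff_mem_keys lc c).mp h
    simp [h, PySem.Dict.keys_modify, PySem.Dict.keys_insert_of_contains _ _ h, hm]
  · simp only [Bool.not_eq_true] at h
    have hm : ¬ c ∈ lc.keys := fun hc => by
      have := (PySem.Dict.contains_iff_mem_keys lc c).mpr hc; simp [h] at this
    simp [h, PySem.Dict.keys_insert_of_not_contains _ _ h, hm, PySem.Set.contains]

-- inner fold over the characters of one word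
theorem pvInnerA_getD (v : Int) (cs : List Char) (lc : PySem.Dict Char Int) (x : Char) :
    (cs.foldl (pvStepA v) lc).getD x 0 = lc.getD x 0 + v * (cs.count x : Int) := by
  induction cs generalizing lc with
  | nil => simp
  | cons c cs ih =>
      simp only [List.foldl_cons, ih, pvStepA_getD, List.count_cons]
      by_cases hx : x = c
      · subst hx; simp; ring
      · have hcx : ¬ c = x := fun hh => hx hh.symm
        simp [hx, hcx]

theorem pvInnerA_keys (v : Int) (cs : List Char) (lc : PySem.Dict Char Int) :
    (cs.foldl (pvStepA v) lc).keys = PySem.Set.update lc.keys cs := by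
  induction cs generalizing lc with
  | nil => simp [PySem.Set.update]
  | cons c cs ih => simp [PySem.Set.update, pvStepA_keys, ih]

-- outer fold over the words: value at any letter
theorem pvOuterA_getD (wd : PySem.Dict String Int) (ws : List String)
    (lc : PySem.Dict Char Int) (x : Char) :
    (ws.foldl (fun lc w => w.toList.foldl (pvStepA (wd.getD w 0)) lc) lc).getD x 0
      = lc.getD x 0 + (ws.map (fun w => wd.getD w 0 * (w.toList.count x : Int))).sum := by
  induction ws generalizing lc with
  | nil => simp
  | cons w ws ih => simp [ih, pvInnerA_getD]; ring

-- outer fold over the words: keys = set(''.join(ws)) (first occurrences in order)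
theorem pvOuterA_keys (wd : PySem.Dict String Int) (ws : List String)
    (lc : PySem.Dict Char Int) :
    (ws.foldl (fun lc w => w.toList.foldl (pvStepA (wd.getD w 0)) lc) lc).keys
      = PySem.Set.update lc.keys (ws.flatMap String.toList) := by
  induction ws generalizing lc with
  | nil => simp [PySem.Set.update]
  | cons w ws ih => simp [pvInnerA_keys, ih, PySem.Set.update, List.foldl_append]

-- ===== VERDICT (by name: the statement is the Claim_ definition above) =====
theorem getLetterCounts_spec : Claim_equal_getLetterCounts := by
  intro word_counts _
  unfold Spec_getLetterCounts getLetterCounts getLetterCounts_alt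
  set wd := PySem.Dict.ofList word_counts with hwd
  have hkeys : (wd.keys.foldl (fun lc w => w.toList.foldl (pvStepA (wd.getD w 0)) lc)
      PySem.Dict.empty).keys = PySem.Set.ofList (wd.keys.flatMap String.toList) := by
    rw [pvOuterA_keys]
    simp [PySem.Set.ofList_eq_foldl, PySem.Set.update, PySem.Dict.keys_empty]
  simp only [hkeys]
  refine List.map_congr_left ?_
  intro c _
  have := pvOuterA_getD wd wd.keys PySem.Dict.empty c
  simp only [PySem.Dict.getD_empty, zero_add] at this
  rw [this]
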